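-- pv_equiv track=rewrite | github.com/JonathanProf/codigoLORA | program_PICO.py | obtenerTiempo
-- ===== SOURCE A (Python) =====
-- def obtenerTiempo(hora, fecha):
--     try:
--         timeStamp = str()
--         tmp = hora.split('.')[0]
--
--         horaCol = int(tmp[0:2]) - 5
--         horaCol = str(horaCol)
--
--         tmp = horaCol + tmp[2:]
--
--         for i, car in enumerate(fecha):
--             if i % 2 == 0 and i > 0:
--                 timeStamp += '-'
--             timeStamp += car
--
--         timeStamp += ' '
--
--         for i, car in enumerate(tmp):
--             if i % 2 == 0 and i > 0:
--                 timeStamp += ':'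
--             timeStamp += car
--
--         return timeStamp
--     except:
--         return '0-0-0 00:00:00'
--
-- timeStamp = str()
-- ===== SOURCE B (Python) =====
-- def obtenerTiempo(hora, fecha):
--     try:
--         tmp = hora.split('.')[0]
--         tmp = str(int(tmp[0:2]) - 5) + tmp[2:]
--         datePart = '-'.join(fecha[i:i+2] for i in range(0, len(fecha), 2))
--         timePart = ':'.join(tmp[i:i+2] for i in range(0, len(tmp), 2))
--         return datePart + ' ' + timePart
--     except:
--         return '0-0-0 00:00:00'
-- ===== Notes on version B (the rewrite author's own statement) =====
-- stated objective: idiomatic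
-- what changed: The two character-by-character loops that test 'i % 2 == 0 and i > 0' to decide where a separator goes are replaced by slicing the string into stride-2 chunks and joining them with '-' / ':'; the hour arithmetic and the bare-except fallback are kept.
import Mathlib
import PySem

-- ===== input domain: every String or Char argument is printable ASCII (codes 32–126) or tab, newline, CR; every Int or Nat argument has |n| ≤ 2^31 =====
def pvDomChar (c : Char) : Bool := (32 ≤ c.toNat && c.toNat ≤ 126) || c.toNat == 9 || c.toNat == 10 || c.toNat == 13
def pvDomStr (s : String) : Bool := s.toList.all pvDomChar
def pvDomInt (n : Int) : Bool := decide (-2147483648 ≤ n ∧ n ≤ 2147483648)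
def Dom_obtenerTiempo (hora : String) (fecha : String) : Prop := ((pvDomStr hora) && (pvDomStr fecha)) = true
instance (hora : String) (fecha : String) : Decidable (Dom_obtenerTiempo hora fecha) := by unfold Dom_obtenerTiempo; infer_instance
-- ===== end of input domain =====

-- B replaces A's two char-by-char separator-insertion loops by stride-2 chunking and a join (objective: idiomatic).

-- ===== PORT A =====
-- one loop step of A: before an even index > 0 append the separator, then append the char
def pvStep (sep : Char) (acc : List Char) (p : Int × Char) : List Char :=
  (if PySem.Int.mod p.1 2 = 0 ∧ 0 < p.1 then acc ++ [sep] else acc) ++ [p.2]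

def obtenerTiempo (hora : String) (fecha : String) : String :=
  let tmp := (PySem.Chars.splitOn hora.toList ['.']).headD []  -- hora.split('.')[0]; split never returns an empty list
  match PySem.Int.ofChars? (PySem.List.slice tmp (some 0) (some 2)) with
  | none => "0-0-0 00:00:00"   -- int() raised ValueError; caught by the bare except
  | some h =>
    let tmp2 := PySem.Int.toChars (h - 5) ++ PySem.List.slice tmp (some 2)
    let ts := (PySem.List.enumerate fecha.toList).foldl (pvStep '-') []
    let ts := ts ++ [' ']
    let ts := (PySem.List.enumerate tmp2).foldl (pvStep ':') ts
    String.ofList ts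

-- ===== PORT B =====
def obtenerTiempo_alt (hora : String) (fecha : String) : String :=
  let tmp := (PySem.Chars.splitOn hora.toList ['.']).headD []  -- hora.split('.')[0]; split never returns an empty list
  match PySem.Int.ofChars? (PySem.List.slice tmp (some 0) (some 2)) with
  | none => "0-0-0 00:00:00"   -- int() raised ValueError; caught by the bare except
  | some h =>
    let tmp2 := PySem.Int.toChars (h - 5) ++ PySem.List.slice tmp (some 2)
    let dateP := PySem.Chars.join ['-']
      ((PySem.List.pyRange 0 (fecha.toList.length : Int) 2).map
        (fun i => PySem.List.slice fecha.toList (some i) (some (i + 2))))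
    let timeP := PySem.Chars.join [':']
      ((PySem.List.pyRange 0 (tmp2.length : Int) 2).map
        (fun i => PySem.List.slice tmp2 (some i) (some (i + 2))))
    String.ofList (dateP ++ [' '] ++ timeP)

-- ===== PRECONDITION & SPEC =====
def Spec_obtenerTiempo (hora : String) (fecha : String) (out : String) : Prop := out = obtenerTiempo_alt hora fecha
instance (hora : String) (fecha : String) (out : String) : Decidable (Spec_obtenerTiempo hora fecha out) := by unfold Spec_obtenerTiempo; infer_instance

-- ===== CLAIM (what is proved, stated in full; the proofs are below) =====
def Claim_equal_obtenerTiempo : Prop := ∀ (hora : String) (fecha : String), Dom_obtenerTiempo hora fecha → Spec_obtenerTiempo hora fecha (obtenerTiempo hora fecha)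

-- ===== LEMMAS AND PROOFS =====

-- the common value of both formatting strategies: sep between successive 2-char chunks
def pvJ (sep : Char) : List Char → List Char
  | [] => []
  | [a] => [a]
  | a :: b :: t => a :: b :: (if t.isEmpty then [] else sep :: pvJ sep t)

theorem pvStep_pos (sep : Char) (acc : List Char) (c : Char) (n : Nat) :
    pvStep sep acc (2 * (n : Int) + 2, c) = acc ++ [sep, c] := by
  have h : PySem.Int.mod (2 * (n : Int) + 2) 2 = 0 := by
    simp [PySem.Int.mod, Int.fmod_eq_emod]
  rw [pvStep, if_pos ⟨h, by omega⟩]; simp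

theorem pvStep_odd (sep : Char) (acc : List Char) (c : Char) (n : Nat) :
    pvStep sep acc (2 * (n : Int) + 3, c) = acc ++ [c] := by
  have h : PySem.Int.mod (2 * (n : Int) + 3) 2 = 1 := by
    simp [PySem.Int.mod, Int.fmod_eq_emod]
  rw [pvStep, if_neg (fun hc => by rw [h] at hc; exact absurd hc.1 one_ne_zero)]

-- A's loop over indices 2, 3, 4, …: a separator lands before every even index
theorem lemA2 (sep : Char) : (t : List Char) → (n : Nat) → (acc : List Char) →
    (PySem.List.enumerate t (2 * (n : Int) + 2)).foldl (pvStep sep) acc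
      = acc ++ (if t.isEmpty then [] else sep :: pvJ sep t)
  | [], n, acc => by simp [PySem.List.enumerate_nil]
  | [a], n, acc => by
      simp only [PySem.List.enumerate_cons, PySem.List.enumerate_nil, List.foldl_cons,
        List.foldl_nil, pvStep_pos, List.isEmpty_cons]
      simp [pvJ]
  | a :: b :: t, n, acc => by
      have ih := lemA2 sep t (n + 1) (acc ++ [sep, a, b])
      simp only [PySem.List.enumerate_cons, List.foldl_cons]
      rw [pvStep_pos]
      have h3 : (2 * (n : Int) + 2) + 1 = 2 * (n : Int) + 3 := by ring
      rw [h3, pvStep_odd]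
      have h4 : (2 * (n : Int) + 3) + 1 = 2 * ((n + 1 : Nat) : Int) + 2 := by push_cast; ring
      have h5 : acc ++ [sep, a] ++ [b] = acc ++ [sep, a, b] := by simp
      rw [h4, h5, ih]
      cases t <;> simp [pvJ]

-- A's whole separator-insertion loop computes pvJ
theorem lemA0 (sep : Char) (l : List Char) (acc : List Char) :
    (PySem.List.enumerate l).foldl (pvStep sep) acc = acc ++ pvJ sep l := by
  have h1 : PySem.Int.mod (0 + 1 : Int) 2 = 1 := by simp [PySem.Int.mod, Int.fmod_eq_emod]
  match l with
  | [] => simp [PySem.List.enumerate, pvJ]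
  | [a] =>
      simp only [PySem.List.enumerate, PySem.List.enumerate_cons, PySem.List.enumerate_nil,
        List.foldl_cons, List.foldl_nil]
      rw [show pvStep sep acc (0, a) = acc ++ [a] by
        rw [pvStep, if_neg (fun hc => lt_irrefl _ hc.2)]]
      simp [pvJ]
  | a :: b :: t =>
      simp only [PySem.List.enumerate, PySem.List.enumerate_cons, List.foldl_cons]
      rw [show pvStep sep acc (0, a) = acc ++ [a] by
            rw [pvStep, if_neg (fun hc => lt_irrefl _ hc.2)],
          show pvStep sep (acc ++ [a]) (0 + 1, b) = acc ++ [a, b] by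
            rw [pvStep, if_neg (fun hc => by rw [h1] at hc; exact absurd hc.1 one_ne_zero)]; simp,
          show ((0 : Int) + 1) + 1 = 2 * ((0 : Nat) : Int) + 2 by norm_num,
          lemA2]
      cases t <;> simp [pvJ]

-- B's stride-2 slices are the 2-chunks of the list
theorem chunks_eq (l : List Char) :
    (PySem.List.pyRange 0 (l.length : Int) 2).map
      (fun i => PySem.List.slice l (some i) (some (i + 2)))
      = (List.range ((l.length + 1) / 2)).map (fun k => (l.drop (2 * k)).take 2) := by
  rw [PySem.List.pyRange_of_pos 0 (l.length : Int) (by norm_num), List.map_map]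
  have hc : (if (0 : Int) < (l.length : Int) then (((l.length : Int) - 0 + 2 - 1) / 2).toNat else 0)
      = (l.length + 1) / 2 := by
    by_cases h : 0 < l.length
    · rw [if_pos (by exact_mod_cast h)]; omega
    · rw [if_neg (by omega)]; omega
  rw [hc]
  apply List.map_congr_left
  intro k _
  have h2 : (0 + 2 * (k : Int)) = ((2 * k : Nat) : Int) := by push_cast; ring
  simp only [Function.comp_apply, h2]
  have h3 : ((2 * k : Nat) : Int) + 2 = ((2 * k + 2 : Nat) : Int) := by push_cast; ring
  rw [h3, PySem.List.slice_natCast]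
  congr 1
  omega

-- joining the 2-chunks with sep computes pvJ
theorem lemB (sep : Char) : (l : List Char) →
    PySem.Chars.join [sep]
      ((List.range ((l.length + 1) / 2)).map (fun k => (l.drop (2 * k)).take 2))
      = pvJ sep l
  | [] => by simp [pvJ, PySem.Chars.join, List.intercalate]
  | [a] => by
      simp only [List.length_singleton]
      rw [show (1 + 1) / 2 = 1 from rfl, List.range_one]
      simp [pvJ, PySem.Chars.join_singleton]
  | a :: b :: t => by
      have hlen : (((a :: b :: t).length + 1) / 2) = ((t.length + 1) / 2) + 1 := by
        simp only [List.length_cons]; omega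
      rw [hlen, List.range_succ_eq_map, List.map_cons, List.map_map]
      have hhead : ((a :: b :: t).drop (2 * 0)).take 2 = [a, b] := by simp
      have htail : (List.range ((t.length + 1) / 2)).map
          ((fun k => ((a :: b :: t).drop (2 * k)).take 2) ∘ Nat.succ)
          = (List.range ((t.length + 1) / 2)).map (fun k => (t.drop (2 * k)).take 2) := by
        apply List.map_congr_left
        intro k _
        have hs : 2 * Nat.succ k = (2 * k + 1) + 1 := by omega
        simp only [Function.comp_apply, hs, List.drop_succ_cons]
      rw [hhead, htail]
      match t with
      | [] => simp [pvJ, PySem.Chars.join_singleton]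
      | c :: t' =>
          have ih := lemB sep (c :: t')
          have hq : (((c :: t').length + 1) / 2) = t'.length / 2 + 1 := by
            simp only [List.length_cons]; omega
          rw [hq, List.range_succ_eq_map, List.map_cons] at ih ⊢
          rw [PySem.Chars.join_cons_cons, ih]
          simp [pvJ]

theorem joinChunks (sep : Char) (l : List Char) :
    PySem.Chars.join [sep]
      ((PySem.List.pyRange 0 (l.length : Int) 2).map
        (fun i => PySem.List.slice l (some i) (some (i + 2))))
      = pvJ sep l := by
  rw [chunks_eq, lemB]

-- ===== VERDICT (by name: the statement is the Claim_ definition above) =====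
theorem obtenerTiempo_spec : Claim_equal_obtenerTiempo := by
  intro hora fecha _
  unfold Spec_obtenerTiempo
  simp only [obtenerTiempo, obtenerTiempo_alt]
  generalize PySem.Int.ofChars? (PySem.List.slice ((PySem.Chars.splitOn hora.toList ['.']).headD [])
      (some 0) (some 2)) = r
  cases r with
  | none => rfl
  | some h => simp only [lemA0, joinChunks, List.nil_append, List.append_assoc]
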